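-- pv_equiv track=rewrite | github.com/glkclass/scrpt | misc/calculate_crc.py | generate_vector_crc
-- ===== SOURCE A (Python) =====
-- import copy
--
-- def generate_vector_crc(polynomial, n_data_bits, lsb=True):
--     """
--     Generate vector CRC calculation scheme based on 'polynomial' of size N <= 64.
--     Using generated scheme CRC will be calculated for input data[n_data_bits] vector at once.
--     We use scheme which requires 'n shifts for n bits' i.e. doesn't require additional shifts at the end.
--
--     Args:
--         'polynomial'    -   (N+1)-bit polynomial representation (highest and lowest degrees are present)
--         'n_data_bits'   -   data vector width
--         'lsb' == True   -   Data is applied LSB else MSB.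
--     Return:
--         List[n_data_bits] of dict {'c': [..], d:[..]} with appropriate crc or data indices to be xor-ed.
--
--     For example:
--     Polynomial = 0x149F <=> x^12 + x^10 + x^7 + x^4 + x^3 + x^2 + x^1 + 1
--     n_data_bits = 8
--     """
--
--     def update_crc_scheme(crc, idx_src, crc_new, idx_dst):
--         for foo in ['c', 'd']:
--             for bar in crc[idx_src][foo]:
--                 if bar in crc_new[idx_dst][foo]:
--                     crc_new[idx_dst][foo].remove(bar)  # imitate xor of two same values
--                 else:
--                     crc_new[idx_dst][foo].append(bar)
--             crc_new[idx_dst][foo].sort()  # just for better visualization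
--
--     # convert polynomial to list of degrees
--     poly = []
--     for i in range(64 + 1):
--         poly.append(polynomial & 1)
--         polynomial = polynomial >> 1
--         if polynomial == 0:
--             break
--     poly = poly[:-1]
--     n_crc = len(poly)
--     assert n_crc > 0, "Too short 'Polynomial' length"
--     # log.debug(f'poly[0:{n_crc-1}] = {poly}')
--
--     crc_new = [{'c': [], 'd':[]} for i in range(n_crc)]
--     crc = [{'c': [i], 'd':[]} for i in range(n_crc)]
--     data_bits_range = range(n_data_bits) if lsb else reversed(range(n_data_bits))
--     for i in data_bits_range:
--         # crc bit #0
--         crc_new[0]['d'].append(i)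
--         update_crc_scheme(crc, -1, crc_new, 0)
--
--         # rest of crc bits
--         for j in range(1, n_crc):
--             update_crc_scheme(crc, j-1, crc_new, j)  # previous crc bit
--             if poly[j] == 1:
--                 # feedback
--                 crc_new[j]['d'].append(i)
--                 update_crc_scheme(crc, -1, crc_new, j)  # last(high) crc bit
--
--         crc = copy.deepcopy(crc_new)
--         crc_new = [{'c': [], 'd':[]} for i in range(n_crc)]
--     # for j in range(n_crc):  log.debug(f'crc scheme [{j}] = {crc[j]}')
--     return crc
-- ===== SOURCE B (Python) =====
-- def generate_vector_crc(polynomial, n_data_bits, lsb=True):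
--     """Bitmask re-implementation: each crc bit's 'c'/'d' index set is carried as an
--     integer bitmask, xor of sets is integer '^'; masks are expanded to sorted index
--     lists once at the end."""
--     # number of crc bits = bit_length - 1; a negative polynomial's arithmetic shift
--     # in A never reaches 0, so A caps its bit loop at 64 crc bits.
--     n_crc = 64 if polynomial < 0 else polynomial.bit_length() - 1
--     assert n_crc > 0, "Too short 'Polynomial' length"
--     poly = [(polynomial >> k) & 1 for k in range(n_crc)]
--
--     c = [1 << j for j in range(n_crc)]   # crc-index masks
--     d = [0] * n_crc                      # data-index masks
--     order = range(n_data_bits) if lsb else reversed(range(n_data_bits))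
--     for i in order:
--         fb_c = c[-1]
--         fb_d = d[-1] ^ (1 << i)
--         c = [fb_c] + [c[j - 1] ^ (fb_c if poly[j] else 0) for j in range(1, n_crc)]
--         d = [fb_d] + [d[j - 1] ^ (fb_d if poly[j] else 0) for j in range(1, n_crc)]
--
--     def bits(m):
--         return [k for k in range(m.bit_length()) if (m >> k) & 1]
--
--     return [{'c': bits(cm), 'd': bits(dm)} for cm, dm in zip(c, d)]
-- ===== Notes on version B (the rewrite author's own statement) =====
-- stated objective: faster
-- what changed: The per-crc-bit 'c'/'d' index sets are carried as integer bitmasks xored with '^' instead of sorted Python lists updated element-by-element with remove/append/sort, and are expanded to sorted index lists once at the end.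
import Mathlib
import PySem

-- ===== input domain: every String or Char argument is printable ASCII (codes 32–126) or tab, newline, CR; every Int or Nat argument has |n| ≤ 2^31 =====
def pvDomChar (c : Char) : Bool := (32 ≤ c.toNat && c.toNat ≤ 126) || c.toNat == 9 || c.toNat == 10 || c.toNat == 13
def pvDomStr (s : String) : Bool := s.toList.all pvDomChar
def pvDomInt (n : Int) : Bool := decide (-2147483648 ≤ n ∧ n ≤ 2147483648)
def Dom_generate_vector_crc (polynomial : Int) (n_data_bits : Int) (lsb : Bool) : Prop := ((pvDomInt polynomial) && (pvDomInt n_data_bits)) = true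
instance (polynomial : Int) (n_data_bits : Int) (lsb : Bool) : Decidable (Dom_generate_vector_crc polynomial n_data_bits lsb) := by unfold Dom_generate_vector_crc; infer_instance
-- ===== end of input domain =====

-- B replaces A's sorted-list index sets (updated by remove/append/sort) with integer
-- bitmasks combined by xor, expanded to sorted index lists once at the end: faster.


-- ===== PORT A =====
-- a dict {'c': .., 'd': ..} is a PySem.Dict String (List Int); the result is its items list

-- the body of A's inner 'for bar in ...' loop: xor-toggle one value into a list
def pvToggle (dst : List Int) (bar : Int) : List Int :=
  if dst.contains bar then (PySem.List.remove? dst bar).getD dst else dst ++ [bar]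

-- one 'foo' round of update_crc_scheme: toggle every bar of src[foo] into dst[foo], then sort
def pvUpdateKey (src dst : PySem.Dict String (List Int)) (foo : String) :
    PySem.Dict String (List Int) :=
  dst.insert foo
    (PySem.List.sorted ((src.getD foo []).foldl pvToggle (dst.getD foo [])) (fun x => x) false)

-- update_crc_scheme(crc, idx_src, crc_new, idx_dst); all indices are in range at A's call
-- sites whenever the assert passed (n_crc ≥ 1), so the pyGetD/pySetD defaults never fire
def pvUpdateCrcScheme (crc : List (PySem.Dict String (List Int))) (idx_src : Int)
    (crc_new : List (PySem.Dict String (List Int))) (idx_dst : Int) :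
    List (PySem.Dict String (List Int)) :=
  ["c", "d"].foldl
    (fun cn foo =>
      PySem.List.pySetD cn idx_dst
        (pvUpdateKey (PySem.List.pyGetD crc idx_src (PySem.Dict.mk []))
          (PySem.List.pyGetD cn idx_dst (PySem.Dict.mk [])) foo))
    crc_new

-- crc_new[j]['d'].append(i)
def pvAppendD (cn : List (PySem.Dict String (List Int))) (j : Int) (i : Int) :
    List (PySem.Dict String (List Int)) :=
  let dct := PySem.List.pyGetD cn j (PySem.Dict.mk [])
  PySem.List.pySetD cn j (dct.insert "d" (dct.getD "d" [] ++ [i]))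

-- A's first loop: append polynomial & 1, shift, break when the shifted value is 0;
-- the fuel is range(64+1)'s iteration count
def pvPolyBits : Int → Nat → List Int
  | _, 0 => []
  | p, fuel + 1 =>
      PySem.Int.band p 1 :: (if p >>> (1:Nat) = 0 then [] else pvPolyBits (p >>> (1:Nat)) fuel)

def pvFreshCrc (n_crc : Nat) : List (PySem.Dict String (List Int)) :=
  (List.range n_crc).map (fun _ => PySem.Dict.ofList [("c", []), ("d", [])])

-- the body of A's 'for i in data_bits_range' loop
def pvIterA (poly : List Int) (n_crc : Nat)
    (crc : List (PySem.Dict String (List Int))) (i : Int) :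
    List (PySem.Dict String (List Int)) :=
  let cn := pvAppendD (pvFreshCrc n_crc) 0 i
  let cn := pvUpdateCrcScheme crc (-1) cn 0
  (PySem.List.pyRange 1 (n_crc : Int) 1).foldl
    (fun cn j =>
      let cn := pvUpdateCrcScheme crc (j - 1) cn j
      if PySem.List.pyGetD poly j 0 = 1 then
        pvUpdateCrcScheme crc (-1) (pvAppendD cn j i) j
      else cn)
    cn

def generate_vector_crc (polynomial : Int) (n_data_bits : Int) (lsb : Bool) :
    List (List (String × List Int)) :=
  let poly := (pvPolyBits polynomial 65).dropLast
  let n_crc := poly.length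
  -- assert n_crc > 0: the inputs on which it fails are excluded by Pre_
  let crc0 := (List.range n_crc).map
    (fun (i : Nat) => PySem.Dict.ofList [("c", [(i : Int)]), ("d", [])])
  let rng := if lsb then PySem.List.pyRange 0 n_data_bits 1
             else (PySem.List.pyRange 0 n_data_bits 1).reverse
  (rng.foldl (pvIterA poly n_crc) crc0).map (·.items)

-- ===== PORT B =====
-- bits(m): the set-bit indices of a mask, ascending
def pvBitIndices (m : Nat) : List Int :=
  List.map (fun k : Nat => (k : Int))
    (List.filter (fun k : Nat => (m >>> k) &&& 1 == 1) (List.range (PySem.Int.bitLength (m : Int))))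

-- B's per-data-bit step on the (c, d) mask vectors; i ≥ 0 at every call, so 1 << i is 1 <<< i.toNat
def pvIterB (poly : List Int) (n_crc : Nat) (st : List Nat × List Nat) (i : Int) :
    List Nat × List Nat :=
  let fb_c := PySem.List.pyGetD st.1 (-1) 0
  let fb_d := PySem.List.pyGetD st.2 (-1) 0 ^^^ (1 <<< i.toNat)
  (fb_c :: (PySem.List.pyRange 1 (n_crc : Int) 1).map
      (fun j => PySem.List.pyGetD st.1 (j - 1) 0 ^^^
        (if PySem.List.pyGetD poly j 0 = 1 then fb_c else 0)),
   fb_d :: (PySem.List.pyRange 1 (n_crc : Int) 1).map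
      (fun j => PySem.List.pyGetD st.2 (j - 1) 0 ^^^
        (if PySem.List.pyGetD poly j 0 = 1 then fb_d else 0)))

def generate_vector_crc_alt (polynomial : Int) (n_data_bits : Int) (lsb : Bool) :
    List (List (String × List Int)) :=
  let n_crc : Nat := if polynomial < 0 then 64 else PySem.Int.bitLength polynomial - 1
  -- assert n_crc > 0: the inputs on which it fails are excluded by Pre_
  let poly : List Int := (List.range n_crc).map (fun (k : Nat) => PySem.Int.band (polynomial >>> k) 1)
  let c0 : List Nat := (List.range n_crc).map (fun j => 1 <<< j)
  let d0 : List Nat := List.replicate n_crc 0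
  let order := if lsb then PySem.List.pyRange 0 n_data_bits 1
               else (PySem.List.pyRange 0 n_data_bits 1).reverse
  let st := order.foldl (pvIterB poly n_crc) (c0, d0)
  (st.1.zip st.2).map (fun p => [("c", pvBitIndices p.1), ("d", pvBitIndices p.2)])

-- ===== PRECONDITION & SPEC =====
-- Pre_ excludes exactly polynomial ∈ {0, 1}: there A (and B alike) fails its
-- assert n_crc > 0 and raises AssertionError.
def Pre_generate_vector_crc (polynomial : Int) (n_data_bits : Int) (lsb : Bool) : Prop :=
  polynomial ≠ 0 ∧ polynomial ≠ 1
instance (polynomial : Int) (n_data_bits : Int) (lsb : Bool) :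
    Decidable (Pre_generate_vector_crc polynomial n_data_bits lsb) := by
  unfold Pre_generate_vector_crc; infer_instance

def pvWitness_generate_vector_crc : Int × Int × Bool := (19, 4, true)

def Spec_generate_vector_crc (polynomial : Int) (n_data_bits : Int) (lsb : Bool)
    (out : List (List (String × List Int))) : Prop :=
  out = generate_vector_crc_alt polynomial n_data_bits lsb
instance (polynomial : Int) (n_data_bits : Int) (lsb : Bool)
    (out : List (List (String × List Int))) :
    Decidable (Spec_generate_vector_crc polynomial n_data_bits lsb out) := by
  unfold Spec_generate_vector_crc; infer_instance

-- ===== CLAIM (what is proved, stated in full; the proofs are below) =====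
def Claim_equal_generate_vector_crc : Prop :=
  ∀ (polynomial : Int) (n_data_bits : Int) (lsb : Bool),
    Dom_generate_vector_crc polynomial n_data_bits lsb →
    Pre_generate_vector_crc polynomial n_data_bits lsb →
    Spec_generate_vector_crc polynomial n_data_bits lsb
      (generate_vector_crc polynomial n_data_bits lsb)

-- ===== LEMMAS AND PROOFS =====

-- abstraction: a pair of bitmasks rendered as A's dict
def pvR (p : Nat × Nat) : PySem.Dict String (List Int) :=
  PySem.Dict.mk [("c", pvBitIndices p.1), ("d", pvBitIndices p.2)]

-- l is the (duplicate-free) list of set-bit indices of mask m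
def pvRepr (l : List Int) (m : Nat) : Prop :=
  l.Nodup ∧ ∀ x : Int, x ∈ l ↔ 0 ≤ x ∧ m.testBit x.toNat

-- the composite effect of update_crc_scheme on the destination dict
def pvUpdDict (src dst : PySem.Dict String (List Int)) : PySem.Dict String (List Int) :=
  pvUpdateKey src (pvUpdateKey src dst "c") "d"

theorem pv_xor4 (a b c : Nat) : (a ^^^ c) ^^^ (b ^^^ c) = a ^^^ b := by
  rw [Nat.xor_comm b c, ← Nat.xor_assoc, Nat.xor_assoc a c c, Nat.xor_self, Nat.xor_zero]

theorem pv_testBit_eq (m k : Nat) : ((m >>> k) &&& 1 == 1) = m.testBit k := by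
  simp [Nat.testBit]

theorem pv_lt_bitLength (m k : Nat) (h : m.testBit k = true) :
    k < PySem.Int.bitLength (m : Int) := by
  have h1 : 2 ^ k ≤ m := Nat.ge_two_pow_of_testBit h
  have h2 : m < 2 ^ PySem.Int.bitLength (m : Int) := by
    have := PySem.Int.lt_two_pow_bitLength (m : Int)
    simpa using this
  have : (2:Nat) ^ k < 2 ^ PySem.Int.bitLength (m : Int) := lt_of_le_of_lt h1 h2
  exact (Nat.pow_lt_pow_iff_right (by omega)).mp this

theorem pv_mem_bitIndices (m : Nat) (x : Int) :
    x ∈ pvBitIndices m ↔ 0 ≤ x ∧ m.testBit x.toNat := by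
  unfold pvBitIndices
  simp only [List.mem_map, List.mem_filter, List.mem_range]
  constructor
  · rintro ⟨k, ⟨-, hb⟩, rfl⟩
    rw [pv_testBit_eq] at hb
    simpa using hb
  · rintro ⟨hx, hb⟩
    exact ⟨x.toNat, ⟨pv_lt_bitLength _ _ hb, by rw [pv_testBit_eq]; exact hb⟩,
      Int.toNat_of_nonneg hx⟩

theorem pv_pairwise_bitIndices (m : Nat) : (pvBitIndices m).Pairwise (· < ·) := by
  unfold pvBitIndices
  refine List.Pairwise.map _ (fun a b h => by exact_mod_cast h) ?_
  exact List.Pairwise.sublist List.filter_sublist List.pairwise_lt_range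

theorem pv_nodup_bitIndices (m : Nat) : (pvBitIndices m).Nodup :=
  (pv_pairwise_bitIndices m).imp (fun h => ne_of_lt h)

theorem pv_repr_bitIndices (m : Nat) : pvRepr (pvBitIndices m) m :=
  ⟨pv_nodup_bitIndices m, pv_mem_bitIndices m⟩

theorem pv_sorted_of_repr (l : List Int) (m : Nat) (h : pvRepr l m) :
    PySem.List.sorted l (fun x => x) false = pvBitIndices m := by
  apply PySem.List.sorted_eq_of_perm_of_pairwise_lt
  · rw [List.perm_ext_iff_of_nodup (pv_nodup_bitIndices m) h.1]
    intro a; rw [pv_mem_bitIndices, h.2]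
  · exact pv_pairwise_bitIndices m

theorem pv_eq_bitIndices_of_repr (l : List Int) (m : Nat) (h : pvRepr l m)
    (hp : l.Pairwise (· < ·)) : l = pvBitIndices m := by
  rw [← pv_sorted_of_repr l m h]
  have h2 : List.Pairwise (fun a b : Int => a ≤ b) l := hp.imp (fun h => le_of_lt h)
  exact (PySem.List.sorted_eq_self_of_pairwise l (fun x => x) h2).symm

theorem pv_bitIndices_zero : pvBitIndices 0 = [] := by decide

theorem pv_toNat_ne (x y : Int) (hx : 0 ≤ x) (hy : 0 ≤ y) (h : x ≠ y) :
    x.toNat ≠ y.toNat := by omega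

theorem pv_repr_singleton (i : Int) (hi : 0 ≤ i) : pvRepr [i] (1 <<< i.toNat) := by
  refine ⟨List.nodup_singleton i, fun x => ?_⟩
  rw [Nat.one_shiftLeft]
  simp only [List.mem_singleton]
  constructor
  · rintro rfl
    exact ⟨hi, Nat.testBit_two_pow_self⟩
  · rintro ⟨hx, hb⟩
    by_contra hne
    rw [Nat.testBit_two_pow_of_ne (pv_toNat_ne i x hi hx (fun h => hne h.symm))] at hb
    exact Bool.false_ne_true hb

theorem pv_bitIndices_shiftLeft (k : Nat) : pvBitIndices (1 <<< k) = [(k : Int)] := by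
  have h := pv_repr_singleton (k : Int) (by positivity)
  rw [Int.toNat_natCast] at h
  exact (pv_eq_bitIndices_of_repr _ _ h (List.pairwise_singleton _ _)).symm

-- removing x (present in l) from the index set xors 2^x out of the mask
theorem pv_repr_remove (l l' : List Int) (b : Nat) (x : Int) (h : pvRepr l b)
    (hx0 : 0 ≤ x) (hbx : b.testBit x.toNat = true) (hnd : l'.Nodup)
    (hmem : ∀ y, y ∈ l' ↔ y ≠ x ∧ y ∈ l) :
    pvRepr l' (b ^^^ (1 <<< x.toNat)) := by
  refine ⟨hnd, fun y => ?_⟩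
  rw [hmem, h.2, Nat.one_shiftLeft]
  by_cases hy : 0 ≤ y
  · by_cases hxy : y = x
    · subst hxy
      simp [Nat.testBit_xor, Nat.testBit_two_pow_self, hbx]
    · rw [Nat.testBit_xor, Nat.testBit_two_pow_of_ne (pv_toNat_ne x y hx0 hy (fun h => hxy h.symm))]
      simp [hxy, hy]
  · simp [hy]

-- adding a fresh x to the index set xors 2^x into the mask
theorem pv_repr_add (l l' : List Int) (b : Nat) (x : Int) (h : pvRepr l b)
    (hx0 : 0 ≤ x) (hfresh : b.testBit x.toNat = false) (hnd : l'.Nodup)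
    (hmem : ∀ y, y ∈ l' ↔ y = x ∨ y ∈ l) :
    pvRepr l' (b ^^^ (1 <<< x.toNat)) := by
  refine ⟨hnd, fun y => ?_⟩
  rw [hmem, h.2, Nat.one_shiftLeft]
  by_cases hy : 0 ≤ y
  · by_cases hxy : y = x
    · subst hxy
      simp [Nat.testBit_xor, Nat.testBit_two_pow_self, hfresh, hy]
    · rw [Nat.testBit_xor, Nat.testBit_two_pow_of_ne (pv_toNat_ne x y hx0 hy (fun h => hxy h.symm))]
      simp [hxy, hy]
  · simp only [hy, false_and, or_false, iff_false]
    rintro rfl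
    exact hy hx0

theorem pv_toggle_repr (acc : List Int) (a : Nat) (x : Int) (h : pvRepr acc a)
    (hx : 0 ≤ x) : pvRepr (pvToggle acc x) (a ^^^ (1 <<< x.toNat)) := by
  unfold pvToggle
  by_cases hc : x ∈ acc
  · rw [if_pos (by simpa using hc)]
    simp only [PySem.List.remove?_eq_some_erase _ _ hc, Option.getD_some]
    exact pv_repr_remove acc _ a x h hx ((h.2 x).mp hc).2 (h.1.erase x)
      (fun y => by rw [h.1.mem_erase_iff])
  · rw [if_neg (by simpa using hc)]
    have hfresh : a.testBit x.toNat = false := by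
      by_contra hb
      exact hc ((h.2 x).mpr ⟨hx, by simpa using hb⟩)
    refine pv_repr_add acc _ a x h hx hfresh ?_ (fun y => by simp [or_comm])
    simp [List.nodup_append, h.1, List.disjoint_singleton, hc]
    exact fun a' ha' hax => hc (hax ▸ ha')

theorem pv_foldToggle_repr :
    ∀ (src : List Int) (b : Nat) (acc : List Int) (a : Nat),
      pvRepr acc a → pvRepr src b → src.foldl pvToggle acc = src.foldl pvToggle acc ∧
      pvRepr (src.foldl pvToggle acc) (a ^^^ b) := by
  intro src
  induction src with
  | nil =>
    intro b acc a ha hb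
    have hb0 : b = 0 := by
      apply Nat.zero_of_testBit_eq_false
      intro k
      by_contra hk
      have := (hb.2 (k : Int)).mpr ⟨by positivity, by simpa using Bool.not_eq_false _ |>.mp hk⟩
      simp at this
    subst hb0
    simpa using ha
  | cons x xs ih =>
    intro b acc a ha hb
    have hx : 0 ≤ x ∧ b.testBit x.toNat := (hb.2 x).mp (List.mem_cons_self)
    have hnd := hb.1
    rw [List.nodup_cons] at hnd
    have hxs : pvRepr xs (b ^^^ (1 <<< x.toNat)) := by
      refine pv_repr_remove (x :: xs) xs b x hb hx.1 hx.2 hnd.2 (fun y => ?_)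
      constructor
      · intro hy
        exact ⟨fun hyx => hnd.1 (hyx ▸ hy), List.mem_cons_of_mem _ hy⟩
      · rintro ⟨hne, hy⟩
        rcases List.mem_cons.mp hy with rfl | hy
        · exact absurd rfl hne
        · exact hy
    have := (ih (b ^^^ (1 <<< x.toNat)) (pvToggle acc x) (a ^^^ (1 <<< x.toNat))
      (pv_toggle_repr acc a x ha hx.1) hxs).2
    rw [pv_xor4] at this
    exact ⟨rfl, by simpa using this⟩

theorem pv_sorted_fold (acc src : List Int) (a b : Nat) (h1 : pvRepr acc a)
    (h2 : pvRepr src b) :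
    PySem.List.sorted (src.foldl pvToggle acc) (fun x => x) false = pvBitIndices (a ^^^ b) :=
  pv_sorted_of_repr _ _ ((pv_foldToggle_repr src b acc a h1 h2).2)

-- shape computations on literal two-key dicts (all definitional)
theorem pv_updDict_mk (s1 s2 t1 t2 : List Int) :
    pvUpdDict (PySem.Dict.mk [("c", s1), ("d", s2)]) (PySem.Dict.mk [("c", t1), ("d", t2)])
      = PySem.Dict.mk [("c", PySem.List.sorted (s1.foldl pvToggle t1) (fun x => x) false),
                       ("d", PySem.List.sorted (s2.foldl pvToggle t2) (fun x => x) false)] := rfl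

theorem pv_pvR_zero : pvR (0, 0) = PySem.Dict.mk [("c", []), ("d", [])] := by
  rw [pvR, pv_bitIndices_zero]

theorem pv_updDict_pvR (p q : Nat × Nat) :
    pvUpdDict (pvR p) (pvR q) = pvR (q.1 ^^^ p.1, q.2 ^^^ p.2) := by
  rw [pvR, pvR, pv_updDict_mk,
    pv_sorted_fold _ _ q.1 p.1 (pv_repr_bitIndices q.1) (pv_repr_bitIndices p.1),
    pv_sorted_fold _ _ q.2 p.2 (pv_repr_bitIndices q.2) (pv_repr_bitIndices p.2)]
  rfl

theorem pv_repr_append (q : Nat) (i : Int) (hi : 0 ≤ i)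
    (hfresh : q.testBit i.toNat = false) :
    pvRepr (pvBitIndices q ++ [i]) (q ^^^ (1 <<< i.toNat)) := by
  have hni : i ∉ pvBitIndices q := by
    rw [pv_mem_bitIndices]
    rintro ⟨-, hb⟩
    rw [hfresh] at hb
    exact Bool.false_ne_true hb
  refine pv_repr_add (pvBitIndices q) _ q i (pv_repr_bitIndices q) hi hfresh ?_ (fun y => by simp [or_comm])
  simp [List.nodup_append, pv_nodup_bitIndices, List.disjoint_singleton, hni]
  exact fun a' ha' hax => hni (hax ▸ ha')

theorem pv_updDict_pvR_append (p q : Nat × Nat) (i : Int) (hi : 0 ≤ i)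
    (hfresh : q.2.testBit i.toNat = false) :
    pvUpdDict (pvR p) (PySem.Dict.mk [("c", pvBitIndices q.1), ("d", pvBitIndices q.2 ++ [i])])
      = pvR (q.1 ^^^ p.1, (q.2 ^^^ (1 <<< i.toNat)) ^^^ p.2) := by
  rw [pvR, pv_updDict_mk,
    pv_sorted_fold _ _ q.1 p.1 (pv_repr_bitIndices q.1) (pv_repr_bitIndices p.1),
    pv_sorted_fold _ _ (q.2 ^^^ (1 <<< i.toNat)) p.2 (pv_repr_append q.2 i hi hfresh)
      (pv_repr_bitIndices p.2)]
  rfl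

-- setting an element of a range-map
theorem pv_set_map_range {α : Type} (n : Nat) (g : Nat → α) (t : Nat) (v : α) :
    ((List.range n).map g).set t v
      = (List.range n).map (fun j => if j = t then v else g j) := by
  apply List.ext_getElem
  · simp
  · intro i h1 h2
    simp only [List.getElem_set, List.getElem_map, List.getElem_range]
    by_cases hit : i = t
    · subst hit; simp
    · rw [if_neg (fun h => hit h.symm), if_neg hit]

theorem pv_getD_map_range' {α : Type} (n : Nat) (g : Nat → α) (t : Nat) (d : α) (h : t < n) :
    PySem.List.pyGetD ((List.range n).map g) (t : Int) d = g t := by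
  rw [PySem.List.pyGetD_natCast]
  exact PySem.List.getD_map_range g n t d h

-- update_crc_scheme as a single functional set at the destination index
theorem pv_update_eq (crc cn : List (PySem.Dict String (List Int))) (s : Int) (j : Nat)
    (hj : j < cn.length) :
    pvUpdateCrcScheme crc s cn (j : Int)
      = PySem.List.pySetD cn (j : Int)
          (pvUpdDict (PySem.List.pyGetD crc s (PySem.Dict.mk []))
            (PySem.List.pyGetD cn (j : Int) (PySem.Dict.mk []))) := by
  simp only [pvUpdateCrcScheme, List.foldl_cons, List.foldl_nil, pvUpdDict,
    PySem.List.pySetD_natCast, PySem.List.pyGetD_natCast]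
  have hset : ∀ v : PySem.Dict String (List Int),
      (cn.set j v).getD j (PySem.Dict.mk []) = v := by
    intro v
    rw [List.getD_eq_getElem?_getD, List.getElem?_set_self (by simpa using hj)]
    rfl
  rw [hset, List.set_set]

theorem pv_appendD_eq (cn : List (PySem.Dict String (List Int))) (j : Nat) (i : Int)
    (hj : j < cn.length) :
    pvAppendD cn (j : Int) i
      = PySem.List.pySetD cn (j : Int)
          ((PySem.List.pyGetD cn (j : Int) (PySem.Dict.mk [])).insert "d"
            ((PySem.List.pyGetD cn (j : Int) (PySem.Dict.mk [])).getD "d" [] ++ [i])) := rfl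

-- a loop that only sets index j (as the A inner loop does) maps f over the fresh suffix
theorem pv_foldSet {α : Type} (dflt Fr : α) (n : Nat) (f : Nat → α → α)
    (body : List α → Int → List α)
    (hbody : ∀ (cn : List α) (j : Int), cn.length = n → 1 ≤ j → j < (n : Int) →
      body cn j = PySem.List.pySetD cn j (f j.toNat (PySem.List.pyGetD cn j dflt))) :
    ∀ (s t : Nat), n - t = s → 1 ≤ t → t ≤ n →
      (PySem.List.pyRange (t : Int) (n : Int) 1).foldl body
          ((List.range n).map (fun j => if j < t then f j Fr else Fr))
        = (List.range n).map (fun j => f j Fr) := by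
  intro s
  induction s with
  | zero =>
    intro t hnt h1 h2
    have ht : t = n := by omega
    subst ht
    rw [PySem.List.pyRange_one_eq_nil (le_refl _), List.foldl_nil]
    apply List.map_congr_left
    intro j hj
    rw [if_pos (List.mem_range.mp hj)]
  | succ s ih =>
    intro t hnt h1 h2
    have htn : t < n := by omega
    rw [PySem.List.pyRange_one_cons (by exact_mod_cast htn), List.foldl_cons]
    rw [hbody _ _ (by simp) (by exact_mod_cast h1) (by exact_mod_cast htn)]
    rw [pv_getD_map_range' n _ t dflt htn, if_neg (lt_irrefl t),
      PySem.List.pySetD_natCast, pv_set_map_range, Int.toNat_natCast]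
    have hcast : ((t : Int) + 1) = ((t + 1 : Nat) : Int) := by push_cast; ring
    rw [hcast]
    have hmap : (List.range n).map (fun j => if j = t then f t Fr else if j < t then f j Fr else Fr)
        = (List.range n).map (fun j => if j < t + 1 then f j Fr else Fr) := by
      apply List.map_congr_left
      intro j hj
      rcases Nat.lt_trichotomy j t with h | h | h
      · rw [if_neg (by omega), if_pos h, if_pos (by omega)]
      · subst h; rw [if_pos rfl, if_pos (by omega)]
      · rw [if_neg (by omega), if_neg (by omega), if_neg (by omega)]
    rw [hmap]
    exact ih (t + 1) (by omega) (by omega) (by omega)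

-- indexing a rendered zip-map state
theorem pv_getD_zip_map (c d : List Nat) (n : Nat) (hc : c.length = n) (hd : d.length = n)
    (j : Nat) (hj : j < n) (dflt : PySem.Dict String (List Int)) :
    PySem.List.pyGetD ((c.zip d).map pvR) (j : Int) dflt
      = pvR (c.getD j 0, d.getD j 0) := by
  have hzl : (c.zip d).length = n := by simp [List.length_zip, hc, hd]
  rw [PySem.List.pyGetD_natCast, List.getD_eq_getElem _ _ (by simp [hzl, hj]),
    List.getElem_map, List.getElem_zip]
  rw [List.getD_eq_getElem _ _ (by omega), List.getD_eq_getElem _ _ (by omega)]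

theorem pv_getD_last_zip_map (c d : List Nat) (n : Nat) (hn : 1 ≤ n) (hc : c.length = n)
    (hd : d.length = n) (dflt : PySem.Dict String (List Int)) :
    PySem.List.pyGetD ((c.zip d).map pvR) (-1) dflt
      = pvR (c.getD (n - 1) 0, d.getD (n - 1) 0) := by
  have hzl : ((c.zip d).map pvR).length = n := by simp [List.length_zip, hc, hd]
  rw [PySem.List.pyGetD_neg_ofNat _ 1 dflt (by omega) (by omega),
    ← List.getD_eq_getElem _ dflt (by omega), hzl,
    List.getD_eq_getElem _ _ (by rw [hzl]; omega : n - 1 < (List.map pvR (c.zip d)).length),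
    List.getElem_map, List.getElem_zip]
  rw [List.getD_eq_getElem _ _ (by omega), List.getD_eq_getElem _ _ (by omega)]

theorem pv_getD_last_nat (d : List Nat) (n : Nat) (hn : 1 ≤ n) (hd : d.length = n) :
    PySem.List.pyGetD d (-1) 0 = d.getD (n - 1) 0 := by
  rw [PySem.List.pyGetD_neg_ofNat _ 1 0 (by omega) (by omega),
    ← List.getD_eq_getElem _ 0 (by omega), hd]

theorem pv_xor5 (a b s : Nat) : (a ^^^ s) ^^^ b = a ^^^ (b ^^^ s) := by
  rw [Nat.xor_assoc, Nat.xor_comm s b]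

theorem pv_getD_pySetD_self {α : Type} (l : List α) (k : Nat) (v dflt : α)
    (h : k < l.length) :
    PySem.List.pyGetD (PySem.List.pySetD l (k : Int) v) (k : Int) dflt = v := by
  rw [PySem.List.pySetD_natCast, PySem.List.pyGetD_natCast, List.getD_eq_getElem?_getD,
    List.getElem?_set_self (by simpa using h)]
  rfl

theorem pv_pySetD_pySetD {α : Type} (l : List α) (k : Nat) (v w : α) :
    PySem.List.pySetD (PySem.List.pySetD l (k : Int) v) (k : Int) w
      = PySem.List.pySetD l (k : Int) w := by
  rw [PySem.List.pySetD_natCast, PySem.List.pySetD_natCast, PySem.List.pySetD_natCast,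
    List.set_set]

-- the initially fresh dict
def pvFr : PySem.Dict String (List Int) := PySem.Dict.mk [("c", []), ("d", [])]

-- the functional effect of one A loop-body position j on the (fresh) dict there
def pvF (poly : List Int) (c d : List Nat) (n : Nat) (i : Int) (j : Nat)
    (x : PySem.Dict String (List Int)) : PySem.Dict String (List Int) :=
  if j = 0 then pvR (c.getD (n - 1) 0, d.getD (n - 1) 0 ^^^ (1 <<< i.toNat))
  else
    let y := pvUpdDict (pvR (c.getD (j - 1) 0, d.getD (j - 1) 0)) x
    if PySem.List.pyGetD poly (j : Int) 0 = 1 then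
      pvUpdDict (pvR (c.getD (n - 1) 0, d.getD (n - 1) 0))
        (y.insert "d" (y.getD "d" [] ++ [i]))
    else y

theorem pv_fresh_eq (n : Nat) : pvFreshCrc n = (List.range n).map (fun _ => pvFr) := rfl

theorem pv_iterA_eval (poly : List Int) (n : Nat) (hn : 1 ≤ n) (c d : List Nat)
    (hc : c.length = n) (hd : d.length = n) (i : Int) (hi : 0 ≤ i) :
    pvIterA poly n ((c.zip d).map pvR) i
      = (List.range n).map (fun j => pvF poly c d n i j pvFr) := by
  simp only [pvIterA]
  have h0 : pvUpdateCrcScheme ((c.zip d).map pvR) (-1)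
        (pvAppendD (pvFreshCrc n) 0 i) 0
      = (List.range n).map (fun j => if j < 1 then pvF poly c d n i j pvFr else pvFr) := by
    rw [pv_fresh_eq]
    rw [show (0 : Int) = ((0 : Nat) : Int) from rfl]
    rw [pv_appendD_eq _ 0 i (by simp; omega)]
    rw [pv_getD_map_range' n _ 0 _ (by omega)]
    rw [show (pvFr.insert "d" (pvFr.getD "d" [] ++ [i]))
        = PySem.Dict.mk [("c", []), ("d", [i])] from rfl]
    rw [PySem.List.pySetD_natCast, pv_set_map_range]
    rw [pv_update_eq _ _ (-1) 0 (by simp; omega)]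
    rw [pv_getD_map_range' n _ 0 _ (by omega), if_pos rfl]
    rw [pv_getD_last_zip_map c d n hn hc hd]
    rw [show PySem.Dict.mk [("c", ([] : List Int)), ("d", [i])]
        = PySem.Dict.mk [("c", pvBitIndices 0), ("d", pvBitIndices 0 ++ [i])] from by
      rw [pv_bitIndices_zero]; rfl]
    rw [pv_updDict_pvR_append (c.getD (n - 1) 0, d.getD (n - 1) 0) (0, 0) i hi
      (by simp [Nat.zero_testBit])]
    rw [PySem.List.pySetD_natCast, pv_set_map_range]
    apply List.map_congr_left
    intro j hj
    by_cases hj0 : j = 0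
    · subst hj0
      rw [if_pos rfl, if_pos (show (0:Nat) < 1 by omega)]
      simp only [pvF, if_pos rfl, Nat.zero_xor]
      rw [Nat.xor_comm (1 <<< i.toNat) (d.getD (n - 1) 0)]
      simp
    · rw [if_neg hj0, if_neg hj0, if_neg (show ¬ j < 1 by omega)]
  rw [h0]
  have hbody : ∀ (cn : List (PySem.Dict String (List Int))) (j : Int),
      cn.length = n → 1 ≤ j → j < (n : Int) →
      (fun cn (j : Int) =>
          if PySem.List.pyGetD poly j 0 = 1 then
            pvUpdateCrcScheme ((c.zip d).map pvR) (-1)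
              (pvAppendD (pvUpdateCrcScheme ((c.zip d).map pvR) (j - 1) cn j) j i) j
          else pvUpdateCrcScheme ((c.zip d).map pvR) (j - 1) cn j) cn j
        = PySem.List.pySetD cn j
            (pvF poly c d n i j.toNat (PySem.List.pyGetD cn j (PySem.Dict.mk []))) := by
    intro cn j hlen h1 hj
    obtain ⟨k, rfl⟩ : ∃ k : Nat, j = (k : Int) :=
      ⟨j.toNat, (Int.toNat_of_nonneg (by omega)).symm⟩
    have hk1 : 1 ≤ k := by exact_mod_cast h1
    have hkn : k < n := by exact_mod_cast hj
    simp only [Int.toNat_natCast]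
    rw [pv_update_eq _ cn ((k : Int) - 1) k (by omega)]
    rw [show ((k : Int) - 1) = ((k - 1 : Nat) : Int) from by push_cast [hk1]; ring]
    rw [pv_getD_zip_map c d n hc hd (k - 1) (by omega)]
    by_cases hcond : PySem.List.pyGetD poly (k : Int) 0 = 1
    · rw [if_pos hcond]
      rw [pv_appendD_eq _ k i (by rw [PySem.List.pySetD_natCast]; simp [hlen, hkn])]
      rw [pv_getD_pySetD_self cn k _ _ (by omega)]
      rw [pv_pySetD_pySetD]
      rw [pv_update_eq _ _ (-1) k (by rw [PySem.List.pySetD_natCast]; simp [hlen, hkn])]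
      rw [pv_getD_pySetD_self cn k _ _ (by omega)]
      rw [pv_pySetD_pySetD]
      rw [pv_getD_last_zip_map c d n hn hc hd]
      simp only [pvF, if_neg (by omega : ¬ k = 0), if_pos hcond]
    · rw [if_neg hcond]
      simp only [pvF, if_neg (by omega : ¬ k = 0), if_neg hcond]
  have hfold := pv_foldSet (PySem.Dict.mk []) pvFr n (pvF poly c d n i) _ hbody
    (n - 1) 1 (by omega) (le_refl 1) hn
  rw [show ((1 : Nat) : Int) = (1 : Int) from rfl] at hfold
  exact hfold

theorem pv_iterB_render (poly : List Int) (n : Nat) (hn : 1 ≤ n) (c d : List Nat)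
    (hc : c.length = n) (hd : d.length = n) (i : Int) (hi : 0 ≤ i)
    (hfresh : ∀ m ∈ d, m.testBit i.toNat = false) :
    (List.range n).map (fun j => pvF poly c d n i j pvFr)
      = (((pvIterB poly n (c, d) i).1).zip ((pvIterB poly n (c, d) i).2)).map pvR := by
  simp only [pvIterB]
  rw [pv_getD_last_nat c n hn hc, pv_getD_last_nat d n hn hd]
  rw [List.zip_cons_cons, List.zip_map', List.map_cons, List.map_map]
  obtain ⟨m, rfl⟩ : ∃ m, n = m + 1 := ⟨n - 1, by omega⟩
  rw [List.range_succ_eq_map, List.map_cons, List.map_map]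
  rw [PySem.List.pyRange_one, List.map_map]
  rw [show (((m + 1 : Nat) : Int) - 1).toNat = m from by push_cast; omega]
  refine congrArg₂ List.cons ?_ ?_
  · simp [pvF]
  · apply List.map_congr_left
    intro k hk
    have hkm : k < m := List.mem_range.mp hk
    simp only [Function.comp_apply]
    have hsk : (Nat.succ k) = k + 1 := rfl
    rw [hsk]
    simp only [pvF, if_neg (by omega : ¬ k + 1 = 0)]
    have hidx : (1 : Int) + (k : Nat) - 1 = ((k : Nat) : Int) := by push_cast; ring
    have hcondeq : ((k + 1 : Nat) : Int) = (1 : Int) + (k : Nat) := by push_cast; ring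
    rw [hcondeq, hidx]
    rw [show PySem.List.pyGetD c ((k : Nat) : Int) 0 = c.getD k 0 from
      PySem.List.pyGetD_natCast c k 0]
    rw [show PySem.List.pyGetD d ((k : Nat) : Int) 0 = d.getD k 0 from
      PySem.List.pyGetD_natCast d k 0]
    have hy : pvUpdDict (pvR (c.getD (k + 1 - 1) 0, d.getD (k + 1 - 1) 0)) pvFr
        = pvR (c.getD k 0, d.getD k 0) := by
      rw [show pvFr = pvR (0, 0) from (pv_pvR_zero).symm, pv_updDict_pvR]
      simp [Nat.zero_xor]
    rw [hy]
    by_cases hcond : PySem.List.pyGetD poly ((1 : Int) + (k : Nat)) 0 = 1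
    · rw [if_pos hcond, if_pos hcond, if_pos hcond]
      have hins : (pvR (c.getD k 0, d.getD k 0)).insert "d"
            ((pvR (c.getD k 0, d.getD k 0)).getD "d" [] ++ [i])
          = PySem.Dict.mk [("c", pvBitIndices (c.getD k 0)),
              ("d", pvBitIndices (d.getD k 0) ++ [i])] := rfl
      rw [hins]
      rw [pv_updDict_pvR_append (c.getD (m + 1 - 1) 0, d.getD (m + 1 - 1) 0)
        (c.getD k 0, d.getD k 0) i hi
        (hfresh _ (by show d.getD k 0 ∈ d
                      rw [List.getD_eq_getElem d 0 (by omega)]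
                      exact List.getElem_mem _))]
      rw [pv_xor5]
    · rw [if_neg hcond, if_neg hcond, if_neg hcond]
      simp [Nat.xor_zero]

theorem pv_iter_eq (poly : List Int) (n : Nat) (hn : 1 ≤ n) (c d : List Nat)
    (hc : c.length = n) (hd : d.length = n) (i : Int) (hi : 0 ≤ i)
    (hfresh : ∀ m ∈ d, m.testBit i.toNat = false) :
    pvIterA poly n ((c.zip d).map pvR) i
      = (((pvIterB poly n (c, d) i).1).zip ((pvIterB poly n (c, d) i).2)).map pvR :=
  (pv_iterA_eval poly n hn c d hc hd i hi).trans
    (pv_iterB_render poly n hn c d hc hd i hi hfresh)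

theorem pv_iterB_len (poly : List Int) (n : Nat) (hn : 1 ≤ n) (st : List Nat × List Nat)
    (i : Int) :
    (pvIterB poly n st i).1.length = n ∧ (pvIterB poly n st i).2.length = n := by
  simp [pvIterB, PySem.List.length_pyRange_one]
  omega

theorem pv_iterB_fresh (poly : List Int) (n : Nat) (hn : 1 ≤ n) (st : List Nat × List Nat)
    (hd : st.2.length = n) (i i' : Int) (hi : 0 ≤ i) (hi' : 0 ≤ i') (hne : i' ≠ i)
    (hf : ∀ m ∈ st.2, m.testBit i'.toNat = false) :
    ∀ m ∈ (pvIterB poly n st i).2, m.testBit i'.toNat = false := by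
  intro m hm
  have hlast : PySem.List.pyGetD st.2 (-1) 0 = st.2.getD (n - 1) 0 :=
    pv_getD_last_nat st.2 n hn hd
  have h2 : (st.2.getD (n - 1) 0).testBit i'.toNat = false := by
    apply hf
    rw [List.getD_eq_getElem st.2 0 (by omega)]
    exact List.getElem_mem _
  rw [List.getD_eq_getElem?_getD] at h2
  have hsh : (1 <<< i.toNat).testBit i'.toNat = false := by
    rw [Nat.one_shiftLeft]
    exact Nat.testBit_two_pow_of_ne (by omega)
  simp only [pvIterB, List.mem_cons] at hm
  rcases hm with rfl | hm
  · rw [hlast]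
    simp [Nat.testBit_xor, h2, hsh]
  · rw [List.mem_map] at hm
    obtain ⟨j, hj, rfl⟩ := hm
    have hjr : 1 ≤ j ∧ j < (n : Int) := PySem.List.mem_pyRange_one.mp hj
    have hidx : j - 1 = (((j - 1).toNat : Nat) : Int) := (Int.toNat_of_nonneg (by omega)).symm
    have hmem : PySem.List.pyGetD st.2 (j - 1) 0 ∈ st.2 := by
      rw [hidx, PySem.List.pyGetD_natCast, List.getD_eq_getElem st.2 0 (by omega)]
      exact List.getElem_mem _
    by_cases hcond : PySem.List.pyGetD poly j 0 = 1
    · simp [hcond, Nat.testBit_xor, hf _ hmem, hlast, h2, hsh]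
    · simp [hcond, Nat.testBit_xor, hf _ hmem]

theorem pv_fold_eq (poly : List Int) (n : Nat) (hn : 1 ≤ n) :
    ∀ (is : List Int) (c d : List Nat), c.length = n → d.length = n →
      (∀ i ∈ is, 0 ≤ i) → is.Nodup →
      (∀ i ∈ is, ∀ m ∈ d, m.testBit i.toNat = false) →
      is.foldl (pvIterA poly n) ((c.zip d).map pvR)
        = ((is.foldl (pvIterB poly n) (c, d)).1.zip
            (is.foldl (pvIterB poly n) (c, d)).2).map pvR := by
  intro is
  induction is with
  | nil => intro c d hc hd _ _ _; rfl
  | cons i is ih =>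
    intro c d hc hd hpos hnd hfr
    simp only [List.foldl_cons]
    rw [pv_iter_eq poly n hn c d hc hd i (hpos i List.mem_cons_self)
      (hfr i List.mem_cons_self)]
    have hlen := pv_iterB_len poly n hn (c, d) i
    have hnd' := List.nodup_cons.mp hnd
    exact ih (pvIterB poly n (c, d) i).1 (pvIterB poly n (c, d) i).2 hlen.1 hlen.2
      (fun x hx => hpos x (List.mem_cons_of_mem _ hx)) hnd'.2
      (fun x hx => pv_iterB_fresh poly n hn (c, d) hd i x (hpos i List.mem_cons_self)
        (hpos x (List.mem_cons_of_mem _ hx)) (fun h => hnd'.1 (h ▸ hx))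
        (hfr x (List.mem_cons_of_mem _ hx)))

theorem pv_init_eq (n : Nat) :
    (List.range n).map (fun (i : Nat) => PySem.Dict.ofList [("c", [(i : Int)]), ("d", [])])
      = (((List.range n).map (fun j => (1 <<< j : Nat))).zip
          (List.replicate n (0 : Nat))).map pvR := by
  have hrep : List.replicate n (0 : Nat) = (List.range n).map (fun _ => 0) := by
    apply List.ext_getElem
    · simp
    · intro i h1 h2; simp
  rw [hrep, List.zip_map', List.map_map]
  apply List.map_congr_left
  intro j hj
  simp only [Function.comp_apply]
  rw [show pvR ((1 <<< j : Nat), (0 : Nat)) = PySem.Dict.mk [("c", [(j : Int)]), ("d", [])] from by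
    simp [pvR, pv_bitIndices_shiftLeft, pv_bitIndices_zero]]
  rfl

theorem pv_shift_one (p : Int) : PySem.Int.floordiv p 2 = p >>> (1 : Nat) := by
  rw [PySem.Int.floordiv_eq_ediv_of_pos (by omega : (0 : Int) < 2), Int.shiftRight_eq_div_pow]
  norm_num

theorem pv_shift_shift (p : Int) (k : Nat) : (p >>> (1 : Nat)) >>> k = p >>> (1 + k) := by
  simp [Int.shiftRight_eq_div_pow, pow_add, Int.ediv_ediv_of_nonneg]

theorem pv_polyBits_neg :
    ∀ (fuel : Nat) (p : Int), p < 0 →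
      pvPolyBits p fuel = (List.range fuel).map (fun (k : Nat) => PySem.Int.band (p >>> k) 1) := by
  intro fuel
  induction fuel with
  | zero => intro p _; rfl
  | succ f ih =>
    intro p hp
    have hneg : p >>> (1 : Nat) < 0 := by rw [Int.shiftRight_eq_div_pow]; omega
    rw [pvPolyBits, if_neg (by omega : ¬ p >>> (1 : Nat) = 0), ih _ hneg,
      List.range_succ_eq_map, List.map_cons, List.map_map]
    congr 1
    · rw [show p >>> (0 : Nat) = p from by simp [Int.shiftRight_eq_div_pow]]
    · apply List.map_congr_left
      intro k _
      simp only [Function.comp_apply, Nat.succ_eq_add_one]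
      rw [pv_shift_shift, Nat.add_comm 1 k]

theorem pv_bitLength_ge_two (p : Int) (h : 2 ≤ p) : 2 ≤ PySem.Int.bitLength p := by
  by_contra hlt
  have h2 := PySem.Int.lt_two_pow_bitLength p
  have h3 : (2 : Nat) ^ PySem.Int.bitLength p ≤ 2 ^ 1 :=
    Nat.pow_le_pow_right (by omega) (by omega)
  simp at h3
  omega

theorem pv_polyBits_pos :
    ∀ (fuel : Nat) (p : Int), 0 < p → p < 2 ^ fuel →
      pvPolyBits p fuel
        = (List.range (PySem.Int.bitLength p)).map (fun (k : Nat) => PySem.Int.band (p >>> k) 1) := by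
  intro fuel
  induction fuel with
  | zero => intro p h1 h2; simp at h2; omega
  | succ f ih =>
    intro p h1 h2
    by_cases hp1 : p = 1
    · subst hp1
      rw [pvPolyBits, if_pos (by decide : (1 : Int) >>> (1 : Nat) = 0)]
      decide
    · have hs1 : 0 < p >>> (1 : Nat) := by rw [Int.shiftRight_eq_div_pow]; omega
      have hsb : p >>> (1 : Nat) < 2 ^ f := by
        rw [Int.shiftRight_eq_div_pow]
        have hpow : (2 : Int) ^ (f + 1) = 2 * 2 ^ f := by ring
        rw [hpow] at h2
        omega
      rw [pvPolyBits, if_neg (by omega : ¬ p >>> (1 : Nat) = 0), ih _ hs1 hsb]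
      have hbl : PySem.Int.bitLength p = PySem.Int.bitLength (p >>> (1 : Nat)) + 1 := by
        rw [PySem.Int.bitLength_of_pos h1, pv_shift_one]
      rw [hbl, List.range_succ_eq_map, List.map_cons, List.map_map]
      congr 1
      · rw [show p >>> (0 : Nat) = p from by simp [Int.shiftRight_eq_div_pow]]
      · apply List.map_congr_left
        intro k _
        simp only [Function.comp_apply, Nat.succ_eq_add_one]
        rw [pv_shift_shift, Nat.add_comm 1 k]

theorem pv_dropLast_map_range {α : Type} (g : Nat → α) (m : Nat) :
    ((List.range (m + 1)).map g).dropLast = (List.range m).map g := by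
  rw [List.range_succ, List.map_append, List.map_cons, List.map_nil, List.dropLast_concat]

theorem pv_poly_spec (p : Int) (hlo : -2147483648 ≤ p) (hhi : p ≤ 2147483648)
    (h0 : p ≠ 0) (h1 : p ≠ 1) :
    (pvPolyBits p 65).dropLast
        = (List.range (if p < 0 then 64 else PySem.Int.bitLength p - 1)).map
            (fun (k : Nat) => PySem.Int.band (p >>> k) 1)
      ∧ 1 ≤ (if p < 0 then 64 else PySem.Int.bitLength p - 1) := by
  by_cases hneg : p < 0
  · rw [if_pos hneg, pv_polyBits_neg 65 p hneg]
    exact ⟨by rw [show (65 : Nat) = 64 + 1 from rfl, pv_dropLast_map_range], by omega⟩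
  · have hpos : 2 ≤ p := by omega
    have hlt : p < 2 ^ 65 := by
      have : (2 : Int) ^ 65 = 36893488147419103232 := by norm_num
      omega
    rw [if_neg hneg, pv_polyBits_pos 65 p (by omega) hlt]
    have hL2 : 2 ≤ PySem.Int.bitLength p := pv_bitLength_ge_two p hpos
    obtain ⟨L, hL⟩ : ∃ L, PySem.Int.bitLength p = L + 1 :=
      ⟨PySem.Int.bitLength p - 1, by omega⟩
    rw [hL]
    exact ⟨by rw [pv_dropLast_map_range]; simp, by omega⟩

-- ===== VERDICT (by name: the statement is the Claim_ definition above) =====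
theorem generate_vector_crc_spec : Claim_equal_generate_vector_crc := by
  intro p nd lsb hDom hPre
  unfold Spec_generate_vector_crc
  obtain ⟨h0, h1⟩ := hPre
  have hDomi : -2147483648 ≤ p ∧ p ≤ 2147483648 := by
    simp [Dom_generate_vector_crc, pvDomInt] at hDom
    exact ⟨hDom.1.1, hDom.1.2⟩
  obtain ⟨hpoly, hn1⟩ := pv_poly_spec p hDomi.1 hDomi.2 h0 h1
  simp only [generate_vector_crc, generate_vector_crc_alt]
  rw [hpoly]
  simp only [List.length_map, List.length_range]
  have hpos : ∀ i ∈ (if lsb then PySem.List.pyRange 0 nd 1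
      else (PySem.List.pyRange 0 nd 1).reverse), 0 ≤ i := by
    intro i hi
    have hmem : i ∈ PySem.List.pyRange 0 nd 1 := by
      cases lsb <;> simp_all [List.mem_reverse]
    exact (PySem.List.mem_pyRange_one.mp hmem).1
  have hnd : (if lsb then PySem.List.pyRange 0 nd 1
      else (PySem.List.pyRange 0 nd 1).reverse).Nodup := by
    cases lsb <;> simp [PySem.List.nodup_pyRange_one, List.nodup_reverse]
  have hfr : ∀ i ∈ (if lsb then PySem.List.pyRange 0 nd 1
      else (PySem.List.pyRange 0 nd 1).reverse),
      ∀ m ∈ List.replicate (if p < 0 then 64 else PySem.Int.bitLength p - 1) (0 : Nat),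
        m.testBit i.toNat = false := by
    intro i _ m hm
    rw [List.eq_of_mem_replicate hm]
    simp [Nat.zero_testBit]
  rw [pv_init_eq]
  rw [pv_fold_eq _ _ hn1 _ _ _ (by simp) (by simp) hpos hnd hfr]
  rw [List.map_map]
  rfl
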